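-- pv_equiv track=rewrite | github.com/ChenlingJ/cj | hackerrank/date_diff.py | epoch_days_offset
-- ===== SOURCE A (Python) =====
-- def is_leap_year(year: int) -> bool:
--     return year % 4 == 0 and (year % 100 != 0 or year % 400 == 0)
--
-- def epoch_days_offset(year: int) -> int:
--     """
--     Gets the number of days that `year` is offset from 1970, accounting
--     for leap years. For example, if `year` is 1971, then the value is 365.
--     If `year` is 1968, the value is -731 (equal to -(365 + 366), because
--     1968 was a leap year.)
--     """
--     start = 1970
--     end = year
--     negative = start > end  # Are we going backwards from 1970?
--     if negative:
--         end, start = start, end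
--
--     days = 0
--     for year in range(start, end):
--         days += 365
--         if is_leap_year(year):
--             days += 1
--
--     if negative:
--         days *= -1
--     return days
-- ===== SOURCE B (Python) =====
-- def epoch_days_offset(year: int) -> int:
--     # Closed form: leap years in [1, n] = n//4 - n//100 + n//400 (floor division).
--     def leaps(n):
--         return n // 4 - n // 100 + n // 400
--     return 365 * (year - 1970) + leaps(year - 1) - leaps(1969)
-- ===== Notes on version B (the rewrite author's own statement) =====
-- stated objective: faster
-- what changed: Replaced the year-by-year accumulation loop with a closed-form leap-year count via floor division, computing the offset with constant arithmetic.
import Mathlib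
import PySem

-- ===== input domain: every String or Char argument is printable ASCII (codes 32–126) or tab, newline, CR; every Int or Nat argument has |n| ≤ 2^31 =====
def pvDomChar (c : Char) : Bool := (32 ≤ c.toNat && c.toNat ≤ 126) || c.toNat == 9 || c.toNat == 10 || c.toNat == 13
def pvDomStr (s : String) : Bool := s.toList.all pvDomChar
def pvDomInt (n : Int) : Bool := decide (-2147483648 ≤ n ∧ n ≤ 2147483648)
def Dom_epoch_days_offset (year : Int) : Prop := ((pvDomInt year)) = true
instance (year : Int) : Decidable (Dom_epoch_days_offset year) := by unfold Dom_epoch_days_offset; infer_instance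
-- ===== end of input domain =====

-- B replaces A's year-by-year loop with a closed-form leap-year count (O(1) vs O(|year-1970|)).

-- ===== PORT A =====
def pv_is_leap_year (year : Int) : Bool :=
  PySem.Int.mod year 4 == 0 && (PySem.Int.mod year 100 != 0 || PySem.Int.mod year 400 == 0)

def epoch_days_offset (year : Int) : Int :=
  let start : Int := 1970
  let e : Int := year
  let negative : Bool := start > e
  let p := if negative then (e, start) else (start, e)
  let days : Int := (PySem.List.pyRange p.1 p.2 1).foldl
    (fun days y => let d := days + 365; if pv_is_leap_year y then d + 1 else d) 0
  if negative then days * -1 else days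

-- ===== PORT B =====
def pv_leaps (n : Int) : Int :=
  PySem.Int.floordiv n 4 - PySem.Int.floordiv n 100 + PySem.Int.floordiv n 400

def epoch_days_offset_alt (year : Int) : Int :=
  365 * (year - 1970) + pv_leaps (year - 1) - pv_leaps 1969

-- ===== PRECONDITION & SPEC =====
def Spec_epoch_days_offset (year : Int) (out : Int) : Prop := out = epoch_days_offset_alt year
instance (year : Int) (out : Int) : Decidable (Spec_epoch_days_offset year out) := by unfold Spec_epoch_days_offset; infer_instance

-- ===== CLAIM (what is proved, stated in full; the proofs are below) =====
def Claim_equal_epoch_days_offset : Prop := ∀ (year : Int), Dom_epoch_days_offset year → Spec_epoch_days_offset year (epoch_days_offset year)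

-- ===== LEMMAS AND PROOFS =====

-- One loop step adds exactly what the closed-form leap count changes by.
theorem leaps_step (y : Int) :
    pv_leaps y - pv_leaps (y - 1) = (if pv_is_leap_year y then 1 else 0) := by
  simp only [pv_leaps, pv_is_leap_year,
    PySem.Int.floordiv_eq_ediv_of_pos (by norm_num : (0:Int) < 4),
    PySem.Int.floordiv_eq_ediv_of_pos (by norm_num : (0:Int) < 100),
    PySem.Int.floordiv_eq_ediv_of_pos (by norm_num : (0:Int) < 400),
    PySem.Int.mod_eq_emod_of_pos (by norm_num : (0:Int) < 4),
    PySem.Int.mod_eq_emod_of_pos (by norm_num : (0:Int) < 100),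
    PySem.Int.mod_eq_emod_of_pos (by norm_num : (0:Int) < 400)]
  split_ifs with h
  · simp only [Bool.and_eq_true, Bool.or_eq_true, beq_iff_eq, bne_iff_ne] at h
    omega
  · simp only [Bool.and_eq_true, Bool.or_eq_true, beq_iff_eq, bne_iff_ne,
      not_and, not_or, not_not] at h
    omega

-- A's loop over range(a, a+n) in closed form (body written in if-normal form).
theorem loop_eq (a : Int) (n : Nat) (init : Int) :
    (PySem.List.pyRange a (a + n) 1).foldl
      (fun days y => if pv_is_leap_year y then days + 365 + 1 else days + 365) init
    = init + 365 * n + (pv_leaps (a + n - 1) - pv_leaps (a - 1)) := by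
  induction n with
  | zero => rw [show a + ((0:Nat):Int) = a from by push_cast; ring, PySem.List.pyRange_one_eq_nil le_rfl]; simp
  | succ k ih =>
      have hb : a + ((k + 1 : Nat) : Int) = (a + (k : Int)) + 1 := by push_cast; ring
      rw [hb, PySem.List.pyRange_one_succ_right (by omega : a ≤ a + (k : Int)),
        List.foldl_append, ih, List.foldl_cons, List.foldl_nil]
      have hx : a + (k : Int) + 1 - 1 = a + (k : Int) := by ring
      rw [hx]
      have hs := leaps_step (a + (k : Int))
      split_ifs with h <;> simp [h] at hs <;> push_cast <;> omega

theorem loop_closed (a b : Int) (h : a ≤ b) :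
    (PySem.List.pyRange a b 1).foldl
      (fun days y => if pv_is_leap_year y then days + 365 + 1 else days + 365) 0
    = 365 * (b - a) + (pv_leaps (b - 1) - pv_leaps (a - 1)) := by
  obtain ⟨n, hn⟩ : ∃ n : Nat, b = a + (n : Int) := ⟨(b - a).toNat, by omega⟩
  subst hn
  rw [loop_eq]
  omega

-- ===== VERDICT (by name: the statement is the Claim_ definition above) =====
theorem epoch_days_offset_spec : Claim_equal_epoch_days_offset := by
  intro year _
  show epoch_days_offset year = epoch_days_offset_alt year
  unfold epoch_days_offset epoch_days_offset_alt
  by_cases h : (1970 : Int) > year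
  · simp only [h, decide_true, if_true]
    rw [loop_closed year 1970 (by omega)]
    have e1 : pv_leaps ((1970:Int) - 1) = pv_leaps 1969 := by norm_num
    rw [e1]; omega
  · simp only [h, decide_false, Bool.false_eq_true, if_false]
    rw [loop_closed 1970 year (by omega)]
    have e1 : pv_leaps ((1970:Int) - 1) = pv_leaps 1969 := by norm_num
    rw [e1]; omega
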